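-- pv_equiv track=rewrite | github.com/spatialdatahub/2017-NSF-Award-analysis | analyses/summarize_award_data.py | accumulator_if
-- ===== SOURCE A (Python) =====
-- def accumulator_if(l, stop):
--     "l is the list and stop is the stop value for the sum of the values in the list."
--     acc = 0
--     count = 0
--
--     for i in l:
--         if acc + i > stop:
--             break
--         else:
--             count = count + 1
--             acc = acc + i
--
--     return {'value': acc, 'count': count, 'stop-value': stop}
-- ===== SOURCE B (Python) =====
-- from itertools import accumulate
--
-- def accumulator_if(l, stop):
--     "l is the list and stop is the stop value for the sum of the values in the list."
--     sums = list(accumulate(l))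
--     count = next((i for i, s in enumerate(sums) if s > stop), len(sums))
--     value = sums[count - 1] if count > 0 else 0
--     return {'value': value, 'count': count, 'stop-value': stop}
-- ===== Notes on version B (the rewrite author's own statement) =====
-- stated objective: alternative
-- what changed: A's fused accumulate-and-break loop is split into two phases: build the full prefix-sum array with itertools.accumulate, then search it for the first entry exceeding stop and read the value off the array.
import Mathlib
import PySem

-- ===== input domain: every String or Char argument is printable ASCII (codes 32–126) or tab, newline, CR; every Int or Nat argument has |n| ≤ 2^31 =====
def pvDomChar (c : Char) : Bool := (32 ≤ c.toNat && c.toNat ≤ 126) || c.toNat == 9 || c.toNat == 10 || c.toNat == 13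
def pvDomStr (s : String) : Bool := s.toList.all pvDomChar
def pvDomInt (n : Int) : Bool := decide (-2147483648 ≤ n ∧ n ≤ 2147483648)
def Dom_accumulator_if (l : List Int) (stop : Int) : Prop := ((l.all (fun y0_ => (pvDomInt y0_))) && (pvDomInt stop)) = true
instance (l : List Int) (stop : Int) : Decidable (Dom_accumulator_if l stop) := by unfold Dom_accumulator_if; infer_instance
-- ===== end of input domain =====

-- B replaces A's fused accumulate-and-break loop with a two-phase version: build the
-- full prefix-sum list, then search it for the first entry exceeding stop (alternative).


-- ===== PORT A =====
-- A's loop with break, as structural recursion over the list carrying (acc, count)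
def pvLoopA (stop : Int) : List Int → Int → Int → Int × Int
  | [], acc, count => (acc, count)
  | i :: rest, acc, count =>
    if acc + i > stop then (acc, count)
    else pvLoopA stop rest (acc + i) (count + 1)

def accumulator_if (l : List Int) (stop : Int) : List (String × Int) :=
  let r := pvLoopA stop l 0 0
  [("value", r.1), ("count", r.2), ("stop-value", stop)]

-- ===== PORT B =====
-- itertools.accumulate(l) starting from a running total
def pvAccum (acc : Int) : List Int → List Int
  | [] => []
  | x :: xs => (acc + x) :: pvAccum (acc + x) xs

-- next((i for i, s in enumerate(sums) if s > stop), len(sums))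
def pvFirstExceed (stop : Int) : List Int → Nat
  | [] => 0
  | s :: ss => if s > stop then 0 else 1 + pvFirstExceed stop ss

def accumulator_if_alt (l : List Int) (stop : Int) : List (String × Int) :=
  let sums := pvAccum 0 l
  let count := pvFirstExceed stop sums
  let value := if count > 0 then sums.getD (count - 1) 0 else 0
  [("value", value), ("count", (count : Int)), ("stop-value", stop)]

-- ===== PRECONDITION & SPEC =====
def Spec_accumulator_if (l : List Int) (stop : Int) (out : List (String × Int)) : Prop := out = accumulator_if_alt l stop
instance (l : List Int) (stop : Int) (out : List (String × Int)) : Decidable (Spec_accumulator_if l stop out) := by unfold Spec_accumulator_if; infer_instance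

-- ===== CLAIM (what is proved, stated in full; the proofs are below) =====
def Claim_equal_accumulator_if : Prop := ∀ (l : List Int) (stop : Int), Dom_accumulator_if l stop → Spec_accumulator_if l stop (accumulator_if l stop)

-- ===== LEMMAS AND PROOFS =====
lemma pvLoopA_eq (stop : Int) : ∀ (l : List Int) (acc count : Int),
    pvLoopA stop l acc count =
      ((if pvFirstExceed stop (pvAccum acc l) > 0 then
          (pvAccum acc l).getD (pvFirstExceed stop (pvAccum acc l) - 1) 0
        else acc),
       count + (pvFirstExceed stop (pvAccum acc l) : Int)) := by
  intro l
  induction l with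
  | nil => intro acc count; simp [pvLoopA, pvAccum, pvFirstExceed]
  | cons x xs ih =>
    intro acc count
    simp only [pvLoopA, pvAccum, pvFirstExceed]
    by_cases h : acc + x > stop
    · simp [h]
    · rw [if_neg h, if_neg h, ih (acc + x) (count + 1)]
      rcases Nat.eq_zero_or_pos (pvFirstExceed stop (pvAccum (acc + x) xs)) with h0 | h0
      · simp [h0]
      · have h1 : 1 + pvFirstExceed stop (pvAccum (acc + x) xs) > 0 := by omega
        simp only [if_pos h0, if_pos h1, Prod.mk.injEq]
        constructor
        · have : 1 + pvFirstExceed stop (pvAccum (acc + x) xs) - 1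
              = (pvFirstExceed stop (pvAccum (acc + x) xs) - 1) + 1 := by omega
          rw [this]
          simp [List.getD]
        · push_cast; ring

-- ===== VERDICT (by name: the statement is the Claim_ definition above) =====
theorem accumulator_if_spec : Claim_equal_accumulator_if := by
  intro l stop _
  unfold Spec_accumulator_if accumulator_if accumulator_if_alt
  rw [pvLoopA_eq]
  simp
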